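-- pv_equiv track=rewrite | github.com/gvwilson/sdxpy | src/compress/binary.py | make_lookup_tables
-- ===== SOURCE A (Python) =====
-- def make_lookup_tables(tokens):
--     """Create forward and backward tables."""
--     forward = {}
--     backward = {}
--     number = 0
--     for t in tokens:
--         if (len(t) == 0) or (t in forward):
--             continue
--         forward[t] = number
--         backward[number] = t
--         number += 1
--     return forward, backward
-- ===== SOURCE B (Python) =====
-- def make_lookup_tables(tokens):
--     """Create forward and backward tables."""
--     nonempty = [t for t in tokens if len(t) != 0]
--     order = sorted(set(nonempty), key=nonempty.index)
--     n = len(order)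
--     forward = dict(zip(order, range(n)))
--     backward = dict(zip(range(n), order))
--     return forward, backward
-- ===== Notes on version B (the rewrite author's own statement) =====
-- stated objective: alternative
-- what changed: Replaces A's single interleaved scan (two dicts and a counter updated in lockstep) by a sort-based construction: take the set of non-empty tokens, sort it by first-occurrence position (key=nonempty.index), and zip the sorted list with range(n) to build each table; numbering agrees because the dedup order is exactly increasing first-occurrence position. Trades speed: the list.index key makes B slower on large inputs.
import Mathlib
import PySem

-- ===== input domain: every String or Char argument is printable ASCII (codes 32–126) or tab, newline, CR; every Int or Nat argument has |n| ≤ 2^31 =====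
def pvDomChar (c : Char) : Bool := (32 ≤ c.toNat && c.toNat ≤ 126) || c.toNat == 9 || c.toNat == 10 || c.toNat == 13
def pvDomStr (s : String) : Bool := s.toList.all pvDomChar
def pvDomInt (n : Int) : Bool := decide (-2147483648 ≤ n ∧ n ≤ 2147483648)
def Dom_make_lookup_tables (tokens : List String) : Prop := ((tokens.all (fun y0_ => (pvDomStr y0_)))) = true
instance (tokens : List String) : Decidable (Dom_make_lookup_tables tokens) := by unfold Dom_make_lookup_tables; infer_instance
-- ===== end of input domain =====

-- B replaces A's interleaved counter-assigning scan by a different algorithm: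
-- sort the SET of non-empty tokens by first-occurrence position, then pair with range(n) (alternative algorithm; trades extra list.index cost for the sort-based construction).

-- ===== PORT A =====
-- loop body of A: skip empty or already-numbered tokens, else extend both dicts and bump the counter
def pvStepA (st : PySem.Dict String Int × PySem.Dict Int String × Int) (t : String) :
    PySem.Dict String Int × PySem.Dict Int String × Int :=
  if PySem.Str.len t = 0 ∨ st.1.contains t = true then st
  else (st.1.insert t st.2.2, st.2.1.insert st.2.2 t, st.2.2 + 1)

def make_lookup_tables (tokens : List String) : (List (String × Int)) × (List (Int × String)) :=
  let st := tokens.foldl pvStepA (PySem.Dict.empty, PySem.Dict.empty, 0)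
  (st.1.items, st.2.1.items)

-- ===== PORT B =====
-- Source B: nonempty = [t for t in tokens if len(t) != 0]; order = sorted(set(nonempty), key=nonempty.index)
-- (each element of the set occurs in nonempty, so .index never raises; the key has no ties);
-- forward = dict(zip(order, range(n))), backward = dict(zip(range(n), order)).
def make_lookup_tables_alt (tokens : List String) : (List (String × Int)) × (List (Int × String)) :=
  let nonempty := tokens.filter (fun t => PySem.Str.len t != 0)
  let order := PySem.List.sorted (PySem.Set.ofList nonempty)
    (fun t => (PySem.List.index? nonempty t).getD 0) false
  let n := order.length
  let forward := PySem.Dict.ofList (order.zip (PySem.List.pyRange 0 (n : Int) 1))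
  let backward := PySem.Dict.ofList ((PySem.List.pyRange 0 (n : Int) 1).zip order)
  (forward.items, backward.items)

-- ===== PRECONDITION & SPEC =====
def Spec_make_lookup_tables (tokens : List String) (out : (List (String × Int)) × (List (Int × String))) : Prop := out = make_lookup_tables_alt tokens
instance (tokens : List String) (out : (List (String × Int)) × (List (Int × String))) : Decidable (Spec_make_lookup_tables tokens out) := by unfold Spec_make_lookup_tables; infer_instance

-- ===== CLAIM (what is proved, stated in full; the proofs are below) =====
def Claim_equal_make_lookup_tables : Prop := ∀ (tokens : List String), Dom_make_lookup_tables tokens → Spec_make_lookup_tables tokens (make_lookup_tables tokens)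

-- ===== LEMMAS AND PROOFS =====

-- the state of A's loop after having accepted exactly the distinct tokens `acc`, in order
def pvState (acc : List String) : PySem.Dict String Int × PySem.Dict Int String × Int :=
  (PySem.Dict.mk ((PySem.List.enumerate acc 0).map (fun p => (p.2, p.1))),
   PySem.Dict.mk (PySem.List.enumerate acc 0),
   (acc.length : Int))

lemma contains_fwd (acc : List String) (t : String) :
    (pvState acc).1.contains t = decide (t ∈ acc) := by
  rw [PySem.Dict.contains_eq_decide_mem_keys]
  simp [pvState, PySem.Dict.keys_mk, List.map_map, Function.comp_def,
    PySem.List.map_snd_enumerate]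

lemma contains_bwd (acc : List String) :
    (pvState acc).2.1.contains ((acc.length : Int)) = false := by
  rw [PySem.Dict.contains_eq_decide_mem_keys]
  simp only [pvState, PySem.Dict.keys_mk, decide_eq_false_iff_not]
  intro h
  rcases List.mem_map.mp h with ⟨p, hp, hfst⟩
  rcases (PySem.List.mem_enumerate_iff _ _ _).mp hp with ⟨k, hk, rfl⟩
  simp at hfst
  omega

lemma step_new (acc : List String) (t : String) (hne : PySem.Str.len t ≠ 0) (hnm : t ∉ acc) :
    pvStepA (pvState acc) t = pvState (acc ++ [t]) := by
  have hc : (pvState acc).1.contains t = false := by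
    rw [contains_fwd]; simpa using hnm
  have hcond : ¬(PySem.Str.len t = 0 ∨ (pvState acc).1.contains t = true) := by
    rintro (h | h)
    · exact hne h
    · rw [hc] at h; exact absurd h (by simp)
  unfold pvStepA
  rw [if_neg hcond]
  have henum : PySem.List.enumerate (acc ++ [t]) 0
      = PySem.List.enumerate acc 0 ++ [((acc.length : Int), t)] := by
    rw [PySem.List.enumerate_append]
    simp [PySem.List.enumerate_cons, PySem.List.enumerate_nil]
  refine Prod.ext ?_ (Prod.ext ?_ ?_)
  · apply PySem.Dict.ext
    rw [PySem.Dict.items_insert_of_not_contains _ _ hc]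
    simp [pvState, henum]
  · apply PySem.Dict.ext
    rw [show (pvState acc).2.2 = ((acc.length : Int)) from rfl,
      PySem.Dict.items_insert_of_not_contains _ _ (contains_bwd acc)]
    simp [pvState, henum]
  · simp [pvState]

lemma loopA (rest acc : List String) :
    rest.foldl pvStepA (pvState acc)
      = pvState (rest.foldl (fun a t => if PySem.Str.len t = 0 then a else PySem.Set.add a t) acc) := by
  induction rest generalizing acc with
  | nil => rfl
  | cons t rs ih =>
    simp only [List.foldl_cons]
    by_cases h0 : PySem.Str.len t = 0
    · rw [show pvStepA (pvState acc) t = pvState acc by unfold pvStepA; rw [if_pos (Or.inl h0)],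
        if_pos h0, ih]
    · rw [if_neg h0]
      by_cases hm : t ∈ acc
      · have : pvStepA (pvState acc) t = pvState acc := by
          unfold pvStepA
          rw [if_pos (Or.inr (by rw [contains_fwd]; simpa using hm))]
        rw [this, show PySem.Set.add acc t = acc by
          simp [PySem.Set.add, PySem.Set.contains, hm], ih]
      · rw [step_new acc t h0 hm, show PySem.Set.add acc t = acc ++ [t] by
          simp [PySem.Set.add, PySem.Set.contains, hm], ih]

lemma foldl_filter_add (tokens : List String) (acc : List String) :
    tokens.foldl (fun a t => if PySem.Str.len t = 0 then a else PySem.Set.add a t) acc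
      = (tokens.filter (fun t => PySem.Str.len t != 0)).foldl PySem.Set.add acc := by
  induction tokens generalizing acc with
  | nil => rfl
  | cons t rs ih =>
    simp only [List.foldl_cons, List.filter_cons]
    by_cases h0 : PySem.Str.len t = 0
    · have hf : (PySem.Str.len t != 0) = false := by
        have h := h0; simp [PySem.Str.len] at h; simp [h]
      rw [if_pos h0, hf]
      simp only [Bool.false_eq_true, if_false]
      exact ih acc
    · have hf : (PySem.Str.len t != 0) = true := by
        have h := h0; simp [PySem.Str.len] at h; simp [h]
      rw [if_neg h0, hf]
      simp only [if_true, List.foldl_cons]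
      exact ih _

-- first-occurrence index of a member is below the list's length
lemma idx_lt_length (l : List String) (a : String) (h : a ∈ l) :
    (PySem.List.index? l a).getD 0 < l.length := by
  rcases Option.isSome_iff_exists.mp ((PySem.List.index?_isSome_iff l a).mpr h) with ⟨k, hk⟩
  rcases (PySem.List.index?_eq_some_iff l a k).mp hk with ⟨pre, suf, hsplit, hlen, _⟩
  rw [hk]
  subst hsplit
  simp [← hlen]

-- invariant of the dedup fold: the accumulated set is strictly ordered by first-occurrence index in `full`
lemma pairwise_aux (full : List String) : ∀ (rest pre : List String), pre ++ rest = full →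
    List.Pairwise (fun a b => (PySem.List.index? full a).getD 0 < (PySem.List.index? full b).getD 0)
      (PySem.Set.ofList pre) →
    List.Pairwise (fun a b => (PySem.List.index? full a).getD 0 < (PySem.List.index? full b).getD 0)
      (rest.foldl PySem.Set.add (PySem.Set.ofList pre)) := by
  intro rest
  induction rest with
  | nil => intro pre _ hp; simpa using hp
  | cons x rs ih =>
    intro pre hfull hp
    have hstep : PySem.Set.add (PySem.Set.ofList pre) x = PySem.Set.ofList (pre ++ [x]) := by
      rw [PySem.Set.ofList_eq_foldl, PySem.Set.ofList_eq_foldl, List.foldl_append]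
      rfl
    have hfull' : (pre ++ [x]) ++ rs = full := by simpa using hfull
    have hp' : List.Pairwise (fun a b => (PySem.List.index? full a).getD 0 < (PySem.List.index? full b).getD 0)
        (PySem.Set.ofList (pre ++ [x])) := by
      by_cases hm : x ∈ pre
      · have : PySem.Set.ofList (pre ++ [x]) = PySem.Set.ofList pre := by
          rw [← hstep, PySem.Set.add]
          simp [PySem.Set.contains, hm]
        rw [this]; exact hp
      · have hcont : PySem.Set.contains (PySem.Set.ofList pre) x = false := by
          simp [PySem.Set.contains, PySem.Set.mem_ofList, hm]
        have : PySem.Set.ofList (pre ++ [x]) = PySem.Set.ofList pre ++ [x] := by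
          rw [← hstep, PySem.Set.add, hcont]
          simp
        rw [this, List.pairwise_append]
        refine ⟨hp, List.pairwise_singleton _ _, ?_⟩
        intro a ha y hy
        have hy' : y = x := by simpa using hy
        rw [hy']
        have hapre : a ∈ pre := by
          have := (PySem.Set.mem_ofList pre a).mp ha
          exact this
        have hidx_a : (PySem.List.index? full a).getD 0 < pre.length := by
          rw [← hfull, PySem.List.index?_append_of_mem (t := x :: rs) hapre]
          exact idx_lt_length pre a hapre
        have hidx_x : (PySem.List.index? full x).getD 0 = pre.length := by
          have : PySem.List.index? full x = some pre.length := by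
            apply (PySem.List.index?_eq_some_iff full x pre.length).mpr
            exact ⟨pre, rs, hfull.symm, rfl, hm⟩
          rw [this]; rfl
        rw [hidx_x]; exact hidx_a
    have := ih (pre ++ [x]) hfull' hp'
    simpa [hstep] using this
-- the deduplicated list is strictly increasing in first-occurrence index
lemma dedup_pairwise (l : List String) :
    List.Pairwise (fun a b => (PySem.List.index? l a).getD 0 < (PySem.List.index? l b).getD 0)
      (PySem.Set.ofList l) := by
  have := pairwise_aux l l [] (by simp) (by simp [PySem.Set.ofList])
  rw [PySem.Set.ofList_eq_foldl]
  simpa [PySem.Set.ofList] using this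

-- sorting the set of `l`'s elements by first-occurrence index gives exactly the ordered dedup of `l`
lemma sorted_by_index_eq_dedup (l : List String) :
    PySem.List.sorted (PySem.Set.ofList l) (fun t => (PySem.List.index? l t).getD 0) false
      = PySem.List.dedup l := by
  rw [PySem.List.dedup_eq_ofList]
  exact PySem.List.sorted_eq_of_perm_of_pairwise_lt _ _ _ (List.Perm.refl _) (dedup_pairwise l)

-- enumerate as a zip with the corresponding range
lemma enum_eq_zip (xs : List String) : ∀ (s : Int),
    PySem.List.enumerate xs s = (PySem.List.pyRange s (s + xs.length) 1).zip xs := by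
  induction xs with
  | nil => intro s; simp [PySem.List.enumerate_nil, PySem.List.pyRange_one_eq_nil]
  | cons x t ih =>
    intro s
    rw [PySem.List.enumerate_cons, PySem.List.pyRange_one_cons (by push_cast [List.length_cons]; omega : s < s + ((x :: t).length : Int))]
    have hlen : s + ((x :: t).length : Int) = (s + 1) + (t.length : Int) := by push_cast [List.length_cons]; ring
    rw [hlen, List.zip_cons_cons, ih (s + 1)]

-- a dict built from pairs with distinct keys has exactly those pairs as items
lemma items_ofList_fresh {κ ν : Type} [BEq κ] [LawfulBEq κ] (L : List (κ × ν))
    (hnd : (L.map Prod.fst).Nodup) : (PySem.Dict.ofList L).items = L := by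
  have := PySem.Dict.items_foldl_insert_fresh (l := L) (k := Prod.fst) (v := Prod.snd)
    (d := PySem.Dict.empty) (by intro a _; simp [PySem.Dict.contains_empty]) hnd
  simpa [PySem.Dict.ofList, PySem.Dict.update] using this

-- ===== VERDICT (by name: the statement is the Claim_ definition above) =====
theorem make_lookup_tables_spec : Claim_equal_make_lookup_tables := by
  intro tokens _
  unfold Spec_make_lookup_tables make_lookup_tables make_lookup_tables_alt
  dsimp only
  have h0 : (PySem.Dict.empty, PySem.Dict.empty, (0 : Int))
      = pvState ([] : List String) := rfl
  rw [h0, loopA, foldl_filter_add, ← PySem.Set.ofList_eq_foldl]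
  rw [sorted_by_index_eq_dedup, PySem.List.dedup_eq_ofList]
  set D := PySem.Set.ofList (tokens.filter (fun t => PySem.Str.len t != 0)) with hDdef
  have hnodup : D.Nodup := by
    rw [hDdef]; exact PySem.Set.nodup_ofList _
  have hlenR : (PySem.List.pyRange 0 (D.length : Int) 1).length = D.length := by
    rw [PySem.List.length_pyRange_one]; simp
  have henum : PySem.List.enumerate D 0 = (PySem.List.pyRange 0 (D.length : Int) 1).zip D := by
    rw [enum_eq_zip D 0]
    norm_num
  have hfwd : (PySem.Dict.ofList (D.zip (PySem.List.pyRange 0 (D.length : Int) 1))).items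
      = D.zip (PySem.List.pyRange 0 (D.length : Int) 1) := by
    apply items_ofList_fresh
    rw [List.map_fst_zip (le_of_eq hlenR.symm)]
    exact hnodup
  have hbwd : (PySem.Dict.ofList ((PySem.List.pyRange 0 (D.length : Int) 1).zip D)).items
      = (PySem.List.pyRange 0 (D.length : Int) 1).zip D := by
    apply items_ofList_fresh
    rw [List.map_fst_zip (le_of_eq hlenR)]
    exact PySem.List.nodup_pyRange_one 0 _
  refine Prod.ext ?_ ?_
  · show (PySem.Dict.mk ((PySem.List.enumerate D 0).map (fun p => (p.2, p.1)))).items = _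
    rw [henum]
    simp only [hfwd]
    have : (fun p : Int × String => (p.2, p.1)) = Prod.swap := by
      funext p; rfl
    rw [this, List.zip_swap]
  · show (PySem.Dict.mk (PySem.List.enumerate D 0)).items = _
    rw [henum]
    simp only [hbwd]
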